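-- pv_equiv track=rewrite | github.com/TeodorBK/advent-of-code-2025 | day3/task2/solution.py | getBattery
-- ===== SOURCE A (Python) =====
-- def getBattery(line, batterySize):
--     digits = list(map(int, line))
--
--     result = []
--     n = len(digits)
--
--     for i in range(n):
--
--         while result and digits[i] > result[-1] and len(result) + (n - i) > batterySize:
--             result.pop()
--         if len(result) < batterySize:
--             result.append(digits[i])
--
--     battery = int(''.join(map(str, result)))
--     return battery
-- ===== SOURCE B (Python) =====
-- def getBattery(line, batterySize):
--     digits = [int(c) for c in line]
--     k = min(batterySize, len(digits))
--
--     def pick(ds, k):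
--         # choose the lexicographically largest length-k subsequence greedily:
--         # take the first maximum of the feasible window, then recurse on the rest
--         if k <= 0:
--             return []
--         window = ds[:len(ds) - k + 1]
--         m = max(window)
--         i = window.index(m)
--         return [m] + pick(ds[i + 1:], k - 1)
--
--     result = pick(digits, k)
--     return int(''.join(map(str, result)))
-- ===== Notes on version B (the rewrite author's own statement) =====
-- stated objective: alternative
-- what changed: Replaces A's one-pass monotonic-stack scan (pop smaller digits while budget allows) by a greedy selection recursion that, for each output slot, takes the first maximum of the feasible window and recurses on the remainder with one digit fewer to pick.
import Mathlib
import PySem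

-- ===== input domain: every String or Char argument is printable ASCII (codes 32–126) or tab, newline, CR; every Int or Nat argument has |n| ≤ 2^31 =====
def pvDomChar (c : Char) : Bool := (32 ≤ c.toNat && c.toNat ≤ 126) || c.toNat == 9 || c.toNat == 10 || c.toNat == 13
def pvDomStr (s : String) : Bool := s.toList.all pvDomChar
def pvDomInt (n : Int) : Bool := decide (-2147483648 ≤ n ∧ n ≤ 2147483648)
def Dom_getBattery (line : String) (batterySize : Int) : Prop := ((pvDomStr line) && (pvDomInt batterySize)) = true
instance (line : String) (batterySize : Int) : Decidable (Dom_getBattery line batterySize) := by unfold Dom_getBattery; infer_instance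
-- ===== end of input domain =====

-- B replaces A's monotonic-stack scan by greedy window-max selection; equivalence of the RETURN value is proved on Pre_.

-- shared by both ports: both Pythons run `int(c)` on every character of `line`
-- (`list(map(int, line))` in A, `[int(c) for c in line]` in B); none = some char raises ValueError
def pvDigits? (line : String) : Option (List Int) :=
  line.toList.mapM (fun c => PySem.Int.ofChars? [c])

-- shared by both ports: both Pythons end with the identical line `int(''.join(map(str, result)))`;
-- the `.getD 0` default is only reached when result = [] (Python raises ValueError there; excluded by Pre_)
def pvJoinInt (res : List Int) : Int :=
  (PySem.Int.ofChars? (PySem.Chars.join [] (res.map PySem.Int.toChars))).getD 0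

-- ===== PORT A =====
-- the inner `while result and digits[i] > result[-1] and len(result)+(n-i) > batterySize: result.pop()`
-- (stack kept reversed: head = result[-1]; rem = n - i)
def popA (bs d : Int) (rem : Nat) : List Int → List Int
  | [] => []
  | top :: res => if d > top ∧ bs < (res.length : Int) + 1 + rem then popA bs d rem res else top :: res

-- `if len(result) < batterySize: result.append(digits[i])`
def pushA (bs d : Int) (res : List Int) : List Int :=
  if (res.length : Int) < bs then d :: res else res

-- the `for i in range(n)` loop; t = number of digits after the list argument (0 at top level), so
-- rem = rest.length + t + 1 = n - i exactly as in A
def runA (bs : Int) (t : Nat) : List Int → List Int → List Int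
  | res, [] => res
  | res, d :: rest => runA bs t (pushA bs d (popA bs d (rest.length + t + 1) res)) rest

def getBattery (line : String) (batterySize : Int) : Int :=
  match pvDigits? line with
  | none => 0  -- Python raises ValueError here; excluded by Pre_
  | some ds => pvJoinInt ((runA batterySize 0 [] ds).reverse)

-- ===== PORT B =====
-- `window = ds[:len(ds) - k + 1]`
def windowB (ds : List Int) (k : Int) : List Int :=
  PySem.List.slice ds none (some ((ds.length : Int) - k + 1))

-- `pick(ds, k)`: first maximum of the window, then recurse on ds[i+1:]
def pickB (ds : List Int) (k : Int) : List Int :=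
  if _h : k ≤ 0 then []
  else
    match PySem.List.max? (windowB ds k) (fun x => x) with
    | none => []  -- Python: max([]) raises ValueError; unreachable under Pre_
    | some m =>
      m :: pickB (PySem.List.slice ds (some (((PySem.List.index? (windowB ds k) m).getD 0 : Int) + 1)) none) (k - 1)
termination_by k.toNat
decreasing_by omega

def getBattery_alt (line : String) (batterySize : Int) : Int :=
  match pvDigits? line with
  | none => 0  -- Python raises ValueError here; excluded by Pre_
  | some ds => pvJoinInt (pickB ds (min batterySize (ds.length : Int)))

-- ===== PRECONDITION & SPEC =====
-- Pre_ excludes exactly the inputs where the Python A raises: a non-digit character (int(c) → ValueError),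
-- and batterySize < 1 or an empty line (then result = [] and int('') → ValueError).
def Pre_getBattery (line : String) (batterySize : Int) : Prop :=
  line.toList ≠ [] ∧ 1 ≤ batterySize ∧ line.toList.all Char.isDigit = true
instance (line : String) (batterySize : Int) : Decidable (Pre_getBattery line batterySize) := by
  unfold Pre_getBattery; infer_instance

def pvWitness_getBattery : String × Int := ("3142", 2)

def Spec_getBattery (line : String) (batterySize : Int) (out : Int) : Prop := out = getBattery_alt line batterySize
instance (line : String) (batterySize : Int) (out : Int) : Decidable (Spec_getBattery line batterySize out) := by unfold Spec_getBattery; infer_instance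

-- ===== CLAIM (what is proved, stated in full; the proofs are below) =====
def Claim_equal_getBattery : Prop := ∀ (line : String) (batterySize : Int), Dom_getBattery line batterySize → Pre_getBattery line batterySize → Spec_getBattery line batterySize (getBattery line batterySize)

-- ===== LEMMAS AND PROOFS =====

-- popped stack is a sublist selection: its elements come from the original stack
theorem popA_subset (bs d : Int) (rem : Nat) (res : List Int) :
    ∀ x ∈ popA bs d rem res, x ∈ res := by
  induction res with
  | nil => simp [popA]
  | cons top rest ih =>
    intro x hx
    simp only [popA] at hx
    split at hx
    · exact List.mem_cons_of_mem _ (ih x hx)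
    · exact hx

-- every stack element comes from the initial stack or the input
theorem runA_subset (bs : Int) (t : Nat) (l : List Int) :
    ∀ res, ∀ x ∈ runA bs t res l, x ∈ res ∨ x ∈ l := by
  induction l with
  | nil => intro res x hx; exact Or.inl hx
  | cons d rest ih =>
    intro res x hx
    rcases ih _ x hx with h | h
    · unfold pushA at h
      split at h
      · rcases List.mem_cons.1 h with rfl | h'
        · simp
        · exact Or.inl (popA_subset _ _ _ _ _ h')
      · exact Or.inl (popA_subset _ _ _ _ _ h)
    · exact Or.inr (List.mem_cons_of_mem _ h)

-- the loop splits over list append (the tail-count t keeps rem = n - i aligned)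
theorem runA_append (bs : Int) (t : Nat) (xs ys : List Int) :
    ∀ res, runA bs t res (xs ++ ys) = runA bs t (runA bs (ys.length + t) res xs) ys := by
  induction xs with
  | nil => intro res; rfl
  | cons d rest ih =>
    intro res
    show runA bs t (pushA bs d (popA bs d ((rest ++ ys).length + t + 1) res)) (rest ++ ys)
        = runA bs t (runA bs (ys.length + t) (pushA bs d (popA bs d (rest.length + (ys.length + t) + 1) res)) rest) ys
    rw [← ih]
    have hrem : (rest ++ ys).length + t + 1 = rest.length + (ys.length + t) + 1 := by
      simp [List.length_append]; omega
    rw [hrem]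

-- a digit strictly greater than everything on the stack pops it all, budget permitting
theorem popA_all (bs m : Int) (rem : Nat) (res : List Int)
    (hlt : ∀ x ∈ res, x < m) (hb : bs ≤ (rem : Int)) :
    popA bs m rem res = [] := by
  induction res with
  | nil => rfl
  | cons top rest ih =>
    have h1 : m > top := hlt top (by simp)
    have h2 : bs < (rest.length : Int) + 1 + rem := by
      have h0 : (0:Int) ≤ (rest.length : Int) := Int.natCast_nonneg _
      omega
    rw [popA, if_pos (And.intro h1 h2)]
    exact ih (fun x hx => hlt x (List.mem_cons_of_mem _ hx))

-- if the budget cannot reach the bottom, popA does nothing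
theorem popA_noop (bs d : Int) (rem : Nat) (res : List Int)
    (h : (res.length : Int) + rem ≤ bs) : popA bs d rem res = res := by
  cases res with
  | nil => rfl
  | cons top rest =>
    have : ¬ (d > top ∧ bs < (rest.length : Int) + 1 + rem) := by
      simp only [List.length_cons] at h; push_cast at h ⊢; omega
    simp only [popA, if_neg this]

-- with no budget nothing is ever pushed
theorem runA_nonpos (bs : Int) (t : Nat) (l : List Int) (hb : bs ≤ 0) :
    runA bs t [] l = [] := by
  induction l with
  | nil => rfl
  | cons d rest ih =>
    show runA bs t (pushA bs d (popA bs d (rest.length + t + 1) [])) rest = []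
    have : pushA bs d (popA bs d (rest.length + t + 1) []) = [] := by
      simp only [popA, pushA, List.length_nil, Nat.cast_zero]
      rw [if_neg (by omega)]
    rw [this, ih]

-- a budget covering everything keeps every digit: the stack is the whole input reversed
theorem runA_big (bs : Int) (t : Nat) (l : List Int) :
    ∀ res, (res.length : Int) + l.length + t ≤ bs → runA bs t res l = l.reverse ++ res := by
  induction l with
  | nil => intro res _; rfl
  | cons d rest ih =>
    intro res hb
    simp only [List.length_cons] at hb
    show runA bs t (pushA bs d (popA bs d (rest.length + t + 1) res)) rest = (d :: rest).reverse ++ res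
    have hpop : popA bs d (rest.length + t + 1) res = res := by
      apply popA_noop; push_cast; omega
    have hpush : pushA bs d res = d :: res := by
      unfold pushA
      have : (res.length : Int) < bs := by push_cast at hb; omega
      simp [this]
    rw [hpop, hpush, ih (d :: res) (by simp; push_cast at hb ⊢; omega)]
    simp

-- processing the single element m over a stack of smaller digits empties it and pushes m
theorem runA_single (bs m : Int) (t : Nat) (S : List Int)
    (hS : ∀ x ∈ S, x < m) (h1 : 1 ≤ bs) (h2 : bs ≤ (t : Int) + 1) :
    runA bs t S [m] = [m] := by
  show runA bs t (pushA bs m (popA bs m (List.length ([] : List Int) + t + 1) S)) [] = [m]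
  rw [popA_all bs m _ S hS (by simp only [List.length_nil]; push_cast; omega)]
  show pushA bs m [] = [m]
  unfold pushA
  rw [if_pos (by simp only [List.length_nil, Nat.cast_zero]; omega)]

-- PHASE 1: all of pre is < m, so after processing pre ++ [m] the stack is exactly [m]
theorem runA_phase1 (bs m : Int) (t : Nat) (pre : List Int)
    (hlt : ∀ x ∈ pre, x < m) (h1 : 1 ≤ bs) (h2 : bs ≤ (t : Int) + 1) :
    runA bs t [] (pre ++ [m]) = [m] := by
  rw [runA_append bs t pre [m]]
  exact runA_single bs m t _
    (fun x hx => by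
      rcases runA_subset bs ([m].length + t) pre [] x hx with h | h
      · simp at h
      · exact hlt x h)
    h1 h2

-- the per-element budget condition under which the bottom sentinel m is never popped
def OkB (m bs : Int) (t : Nat) : List Int → Prop
  | [] => True
  | d :: rest => (m < d → (rest.length : Int) + t + 2 ≤ bs) ∧ OkB m bs t rest

theorem okB_of_index (m bs : Int) (t : Nat) (l : List Int)
    (h : ∀ j (hj : j < l.length), m < l[j] → ((l.length : Int) - j) + t + 1 ≤ bs) :
    OkB m bs t l := by
  induction l with
  | nil => trivial
  | cons d rest ih =>
    refine ⟨fun hd => ?_, ih (fun j hj hmj => ?_)⟩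
    · have := h 0 (by simp) (by simpa using hd)
      simp only [List.length_cons] at this; push_cast at this ⊢; omega
    · have := h (j + 1) (by simp; omega) (by simpa using hmj)
      simp only [List.length_cons] at this; push_cast at this ⊢; omega

-- popping above a protected bottom element m behaves like popping with budget bs-1 and no m
theorem popA_over (bs d m : Int) (rem : Nat) (S : List Int)
    (hm : m < d → (rem : Int) + 1 ≤ bs) :
    popA bs d rem (S ++ [m]) = popA (bs - 1) d rem S ++ [m] := by
  induction S with
  | nil =>
    have : ¬ (d > m ∧ bs < (List.length ([] : List Int) : Int) + 1 + rem) := by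
      simp only [List.length_nil, Nat.cast_zero]
      rintro ⟨h1, h2⟩
      have := hm h1; omega
    simp only [popA, List.nil_append, if_neg this]
  | cons s S' ih =>
    show popA bs d rem (s :: (S' ++ [m])) = popA (bs-1) d rem (s :: S') ++ [m]
    rw [popA, popA]
    by_cases hc : d > s ∧ bs - 1 < (S'.length : Int) + 1 + rem
    · rw [if_pos (by
        refine ⟨hc.1, ?_⟩
        have := hc.2
        simp only [List.length_append, List.length_cons, List.length_nil]
        push_cast; omega), if_pos hc]
      exact ih
    · rw [if_neg (by
        simp only [List.length_append, List.length_cons, List.length_nil, not_and] at hc ⊢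
        intro hd
        by_cases hds : d > s
        · have := hc hds; push_cast at this ⊢; omega
        · exact absurd hd hds), if_neg hc]
      rfl

-- PHASE 2: with OkB, running over suf with m at the bottom = running with budget bs-1 on an m-less stack
theorem runA_phase2 (bs m : Int) (t : Nat) (suf : List Int) :
    ∀ S, OkB m bs t suf → runA bs t (S ++ [m]) suf = runA (bs - 1) t S suf ++ [m] := by
  induction suf with
  | nil => intro S _; rfl
  | cons d rest ih =>
    intro S hok
    obtain ⟨hd, hrest⟩ := hok
    show runA bs t (pushA bs d (popA bs d (rest.length + t + 1) (S ++ [m]))) rest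
        = runA (bs-1) t (pushA (bs-1) d (popA (bs-1) d (rest.length + t + 1) S)) rest ++ [m]
    rw [popA_over bs d m _ S (by intro h; have := hd h; push_cast at this ⊢; omega)]
    set P := popA (bs - 1) d (rest.length + t + 1) S with hP
    have hpush : pushA bs d (P ++ [m]) = pushA (bs - 1) d P ++ [m] := by
      unfold pushA
      by_cases hc : (P.length : Int) < bs - 1
      · rw [if_pos (by simp; omega), if_pos hc]; simp
      · rw [if_neg (by simp; omega), if_neg hc]
    rw [hpush]
    exact ih _ hrest

-- B's recursion picks the whole list when the budget equals its length
theorem pickB_full (ds : List Int) : pickB ds (ds.length : Int) = ds := by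
  induction ds with
  | nil => simp [pickB]
  | cons d rest ih =>
    rw [pickB]
    have h0 : ¬ ((d :: rest).length : Int) ≤ 0 := by
      simp only [List.length_cons]; push_cast; omega
    rw [dif_neg h0]
    have hw : windowB (d :: rest) ((d :: rest).length : Int) = [d] := by
      unfold windowB
      have : ((d :: rest).length : Int) - (d :: rest).length + 1 = ((1 : Nat) : Int) := by push_cast; ring
      rw [this, PySem.List.slice_to_natCast]; rfl
    rw [hw]
    have hmax : PySem.List.max? [d] (fun x => x) = some d := rfl
    rw [hmax]
    show d :: pickB (PySem.List.slice (d :: rest)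
        (some (((PySem.List.index? [d] d).getD 0 : Int) + 1)) none) (((d :: rest).length : Int) - 1)
      = d :: rest
    have hidx : ((PySem.List.index? [d] d).getD 0 : Int) + 1 = ((1 : Nat) : Int) := by
      rw [PySem.List.index?_cons_self]; norm_num
    rw [hidx, PySem.List.slice_from_natCast]
    have : ((d :: rest).length : Int) - 1 = (rest.length : Int) := by simp
    rw [this]
    show d :: pickB rest (rest.length : Int) = d :: rest
    rw [ih]

-- MAIN LEMMA: for 0 ≤ b ≤ n the stack scan and the greedy selection agree
theorem runA_eq_pickB (b : Nat) : ∀ ds : List Int, b ≤ ds.length →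
    (runA (b : Int) 0 [] ds).reverse = pickB ds (b : Int) := by
  induction b with
  | zero =>
    intro ds _
    rw [runA_nonpos _ _ _ (by norm_num)]
    simp [pickB]
  | succ b ih =>
    intro ds hbn
    set n := ds.length with hn
    -- the window w and its first maximum m at index idx
    set wlen : Nat := n - b with hwlen
    set w := ds.take wlen with hwdef
    have hwlen_eq : wlen = n - b := hwlen
    have hwlen_pos : 1 ≤ wlen := by omega
    have hwl : w.length = wlen := by
      rw [hwdef, List.length_take]; omega
    have hwne : w ≠ [] := by
      intro hcon
      rw [hcon] at hwl
      simp at hwl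
      omega
    obtain ⟨m, hm⟩ : ∃ m, PySem.List.max? w (fun x => x) = some m := by
      cases hmx : PySem.List.max? w (fun x => x) with
      | none => exact absurd ((PySem.List.max?_eq_none_iff _ _).mp hmx) hwne
      | some m => exact ⟨m, rfl⟩
    have hmmem : m ∈ w := PySem.List.max?_mem hm
    have hmle : ∀ y ∈ w, y ≤ m := PySem.List.max?_isMax hm
    obtain ⟨idx, hidx⟩ : ∃ idx, PySem.List.index? w m = some idx := by
      cases hix : PySem.List.index? w m with
      | none =>
        rw [PySem.List.index?_eq_idxOf?] at hix
        exact absurd (List.idxOf?_eq_none_iff.mp hix) (by simpa using hmmem)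
      | some idx => exact ⟨idx, rfl⟩
    obtain ⟨hidxlt, hwidx, hfirst⟩ := PySem.List.getElem_of_index?_eq_some hidx
    have hidxw : idx < wlen := by omega
    have hidxn : idx < n := by omega
    -- decompose ds = pre ++ m :: suf
    set pre := ds.take idx with hpre
    set suf := ds.drop (idx + 1) with hsuf
    have hdsidx : ds[idx]'(hn ▸ hidxn) = m := by
      rw [← hwidx]
      exact (List.getElem_take).symm
    have hdecomp : ds = (pre ++ [m]) ++ suf := by
      rw [hpre, hsuf, List.append_assoc, List.singleton_append, ← hdsidx]
      rw [List.getElem_cons_drop, List.take_append_drop]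
    have hprelen : pre.length = idx := by rw [hpre, List.length_take]; omega
    have hsuflen : suf.length = n - (idx + 1) := by rw [hsuf, List.length_drop]
    have hprelt : ∀ x ∈ pre, x < m := by
      intro x hx
      obtain ⟨j, hj, hxj⟩ := List.getElem_of_mem hx
      have hjlen : j < idx := by
        rw [hprelen] at hj; exact hj
      have hjw : j < w.length := by omega
      have hxw : x = w[j]'hjw := by
        rw [← hxj]
        exact List.getElem_take.trans List.getElem_take.symm
      have hne : x ≠ m := by rw [hxw]; exact hfirst j hjlen
      have hle : x ≤ m := hmle x (by rw [hxw]; exact List.getElem_mem _)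
      omega
    have hidxle : idx ≤ n - (b + 1) := by omega
    -- run A over the decomposition
    have hA : runA ((b+1 : Nat) : Int) 0 [] ds
        = runA ((b+1 : Nat) : Int) 0 [m] suf := by
      conv_lhs => rw [hdecomp]
      rw [runA_append, Nat.add_zero]
      rw [runA_phase1 _ _ _ _ hprelt (by push_cast; omega) (by rw [hsuflen]; push_cast; omega)]
    have hok : OkB m ((b+1 : Nat) : Int) 0 suf := by
      apply okB_of_index
      intro j hj hmj
      -- if suf[j] > m then suf[j] is outside the window: n - (idx+1+j) ≤ b
      by_contra hcon
      push Not at hcon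
      have hjw : idx + 1 + j < wlen := by
        rw [hsuflen] at hcon hj
        push_cast at hcon
        omega
      have hsufj : suf[j] = w[idx + 1 + j]'(by omega) := by
        exact List.getElem_drop.trans List.getElem_take.symm
      have := hmle (w[idx + 1 + j]'(by omega)) (List.getElem_mem _)
      rw [hsufj] at hmj
      omega
    have hA2 : runA ((b+1 : Nat) : Int) 0 [m] suf
        = runA (((b+1 : Nat) : Int) - 1) 0 [] suf ++ [m] := by
      have := runA_phase2 ((b+1 : Nat) : Int) m 0 suf [] hok
      rw [List.nil_append] at this
      exact this
    have hbcast : (((b+1 : Nat) : Int) - 1) = (b : Int) := by push_cast; ring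
    -- B side: unfold one step of pickB
    have hBstep : pickB ds ((b+1 : Nat) : Int)
        = m :: pickB suf (b : Int) := by
      rw [pickB]
      rw [dif_neg (by push_cast; omega)]
      have hw' : windowB ds ((b+1 : Nat) : Int) = w := by
        unfold windowB
        have hcst : ((ds.length : Nat) : Int) - ((b+1 : Nat) : Int) + 1 = ((wlen : Nat) : Int) := by
          rw [hwlen, hn]; push_cast; omega
        rw [hcst, PySem.List.slice_to_natCast, hwdef]
      rw [hw', hm]
      show m :: pickB (PySem.List.slice ds
          (some (((PySem.List.index? w m).getD 0 : Int) + 1)) none) (((b+1 : Nat) : Int) - 1)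
        = m :: pickB suf (b : Int)
      have hidxD : (PySem.List.index? w m).getD 0 = idx := by rw [hidx]; rfl
      simp only [hidxD]
      have hsl : PySem.List.slice ds (some ((idx : Int) + 1)) none = suf := by
        have : ((idx : Int) + 1) = (((idx + 1 : Nat)) : Int) := by push_cast; ring
        rw [this, PySem.List.slice_from_natCast, hsuf]
      rw [hsl]
      congr 1
      have : ((b+1 : Nat) : Int) - 1 = (b : Int) := by push_cast; ring
      rw [this]
    rw [hA, hA2, hbcast, List.reverse_append, hBstep]
    simp only [List.reverse_singleton, List.singleton_append, List.cons.injEq, true_and]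
    exact ih suf (by rw [hsuflen]; omega)

-- the two ports produce the same selected-digit list for every batterySize
theorem runA_eq_pickB_min (ds : List Int) (bs : Int) :
    (runA bs 0 [] ds).reverse = pickB ds (min bs (ds.length : Int)) := by
  rcases le_or_gt bs (ds.length : Int) with hle | hgt
  · rw [min_eq_left hle]
    rcases le_or_gt bs 0 with h0 | h0
    · rw [runA_nonpos _ _ _ h0]
      rw [pickB, dif_pos h0]
      rfl
    · have hb : bs = ((bs.toNat : Nat) : Int) := by omega
      rw [hb]
      exact runA_eq_pickB bs.toNat ds (by omega)
  · rw [min_eq_right (le_of_lt hgt)]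
    rw [runA_big bs 0 ds [] (by simp only [List.length_nil, Nat.cast_zero]; omega)]
    rw [pickB_full]
    simp

-- ===== VERDICT (by name: the statement is the Claim_ definition above) =====
theorem getBattery_spec : Claim_equal_getBattery := by
  intro line batterySize _ _
  unfold Spec_getBattery getBattery getBattery_alt
  cases h : pvDigits? line with
  | none => rfl
  | some ds =>
    show pvJoinInt ((runA batterySize 0 [] ds).reverse)
        = pvJoinInt (pickB ds (min batterySize (ds.length : Int)))
    rw [runA_eq_pickB_min]
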